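-- pv_equiv track=rewrite | github.com/kaosushijin/aurora-rp | iterations/aurora3.nc3.py | _highlight_match
-- ===== SOURCE A (Python) =====
-- def _highlight_match(text, search_term):
--     """Create highlighted version of text for search results"""
--     # Simple case-insensitive highlighting
--     lower_text = text.lower()
--     lower_term = search_term.lower()
--
--     highlighted = ""
--     last_end = 0
--
--     start = lower_text.find(lower_term)
--     while start != -1:
--         highlighted += text[last_end:start]
--         highlighted += f"[MATCH]{text[start:start+len(search_term)]}[/MATCH]"
--         last_end = start + len(search_term)
--         start = lower_text.find(lower_term, last_end)
--
--     highlighted += text[last_end:]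
--     return highlighted
-- ===== SOURCE B (Python) =====
-- def _highlight_match(text, search_term):
--     """Create highlighted version of text for search results"""
--     # Naive left-to-right scanner: at each position test for a case-insensitive
--     # match directly (no .find calls); emit the wrapped match and jump over it,
--     # or emit the single character and advance by one.
--     lower_text = text.lower()
--     lower_term = search_term.lower()
--     n = len(search_term)
--
--     parts = []
--     i = 0
--     while i < len(text):
--         if lower_text[i:i + n] == lower_term:
--             parts.append("[MATCH]" + text[i:i + n] + "[/MATCH]")
--             i += n
--         else:
--             parts.append(text[i])
--             i += 1
--     return "".join(parts)
-- ===== Notes on version B (the rewrite author's own statement) =====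
-- stated objective: alternative
-- what changed: A repeatedly calls str.find to jump between matches and concatenates onto a growing string; B is a position-by-position scanner that never calls find: at each index it compares the lowercased slice against the term directly, emitting either a wrapped match (jumping by its length) or one character.
import Mathlib
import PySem

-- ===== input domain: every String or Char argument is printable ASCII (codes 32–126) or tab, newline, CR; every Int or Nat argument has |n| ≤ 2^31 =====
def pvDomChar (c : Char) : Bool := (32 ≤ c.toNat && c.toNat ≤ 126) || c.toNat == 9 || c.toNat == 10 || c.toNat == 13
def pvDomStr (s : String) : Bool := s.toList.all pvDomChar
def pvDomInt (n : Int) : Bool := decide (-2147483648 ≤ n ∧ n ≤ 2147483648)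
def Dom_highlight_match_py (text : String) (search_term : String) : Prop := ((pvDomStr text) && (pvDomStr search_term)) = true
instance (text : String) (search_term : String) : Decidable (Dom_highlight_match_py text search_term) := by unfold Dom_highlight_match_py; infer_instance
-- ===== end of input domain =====

-- B replaces A's repeated str.find jumps with a position-by-position scanner that
-- compares the lowercased slice at each index directly; same results, no find calls.

-- ===== PORT A =====
-- A's while-loop: state (last_end, start, highlighted); fuel = text.length + 1 is a totality
-- guard only — with a nonempty search term starts strictly increase, so it never runs out
-- (on the empty search term the Python loops forever; Pre_ excludes that input).
def hmLoopA (t lt lterm : List Char) (n : Nat) :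
    Nat → Nat → Int → List Char → List Char
  | 0, last_end, _, acc => acc ++ PySem.List.slice t (some (last_end : Int)) none
  | fuel + 1, last_end, start, acc =>
    if start = -1 then
      acc ++ PySem.List.slice t (some (last_end : Int)) none
    else
      hmLoopA t lt lterm n fuel (start.toNat + n)
        (PySem.Chars.findFrom lt lterm ((start.toNat + n : Nat) : Int) none)
        (acc ++ PySem.List.slice t (some (last_end : Int)) (some start)
             ++ "[MATCH]".toList
             ++ PySem.List.slice t (some start) (some (start + (n : Int)))
             ++ "[/MATCH]".toList)

def highlight_match_py (text : String) (search_term : String) : String :=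
  let t := text.toList
  let lt := PySem.Chars.lower t
  let lterm := PySem.Chars.lower search_term.toList
  String.ofList
    (hmLoopA t lt lterm search_term.toList.length (t.length + 1) 0
      (PySem.Chars.find lt lterm) [])

-- ===== PORT B =====
-- B's while-loop over the position i; fuel = text.length + 1 is a totality guard only —
-- each step advances i by n ≥ 1 or by 1 (on the empty search term the Python loops
-- forever on nonempty text; Pre_ excludes it). text[i] is in range by the guard
-- i < len(text), so List.getD is exact there.
def hmScan (t lt lterm : List Char) (n : Nat) : Nat → Nat → List Char
  | 0, _ => []
  | fuel + 1, i =>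
    if i < t.length then
      if PySem.List.slice lt (some (i : Int)) (some ((i + n : Nat) : Int)) = lterm then
        "[MATCH]".toList
          ++ PySem.List.slice t (some (i : Int)) (some ((i + n : Nat) : Int))
          ++ "[/MATCH]".toList
          ++ hmScan t lt lterm n fuel (i + n)
      else
        t.getD i default :: hmScan t lt lterm n fuel (i + 1)
    else []

def highlight_match_py_alt (text : String) (search_term : String) : String :=
  let t := text.toList
  let lt := PySem.Chars.lower t
  let lterm := PySem.Chars.lower search_term.toList
  let n := search_term.toList.length
  String.ofList (hmScan t lt lterm n (t.length + 1) 0)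

-- ===== PRECONDITION & SPEC =====
-- Pre_ excludes the empty search term, on which the Python A never returns (its
-- find("") loop runs forever), so no value is claimed there.
def Pre_highlight_match_py (text : String) (search_term : String) : Prop :=
  search_term ≠ ""
instance (text : String) (search_term : String) : Decidable (Pre_highlight_match_py text search_term) := by unfold Pre_highlight_match_py; infer_instance

def pvWitness_highlight_match_py : String × String := ("Hello hello!", "he")

def Spec_highlight_match_py (text : String) (search_term : String) (out : String) : Prop := out = highlight_match_py_alt text search_term
instance (text : String) (search_term : String) (out : String) : Decidable (Spec_highlight_match_py text search_term out) := by unfold Spec_highlight_match_py; infer_instance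

-- ===== CLAIM (what is proved, stated in full; the proofs are below) =====
def Claim_equal_highlight_match_py : Prop := ∀ (text : String) (search_term : String), Dom_highlight_match_py text search_term → Pre_highlight_match_py text search_term → Spec_highlight_match_py text search_term (highlight_match_py text search_term)

-- ===== LEMMAS AND PROOFS =====

-- A scan whose position is past the end returns nothing.
lemma hmScan_past (t lt lterm : List Char) (n : Nat) (f i : Nat) (h : t.length ≤ i) :
    hmScan t lt lterm n f i = [] := by
  cases f with
  | zero => rfl
  | succ f => simp [hmScan, Nat.not_lt.mpr h]

-- With a nonempty term, any two sufficient fuels give the same scan.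
lemma hmScan_fuel (t lt lterm : List Char) (n : Nat) (hn : 1 ≤ n) :
    ∀ f1 f2 i, t.length ≤ i + f1 → t.length ≤ i + f2 →
      hmScan t lt lterm n f1 i = hmScan t lt lterm n f2 i := by
  intro f1
  induction f1 with
  | zero =>
    intro f2 i h1 _
    rw [hmScan_past t lt lterm n 0 i (by omega), hmScan_past t lt lterm n f2 i (by omega)]
  | succ f1 ih =>
    intro f2 i h1 h2
    by_cases hi : i < t.length
    · cases f2 with
      | zero => omega
      | succ f2 =>
        simp only [hmScan, if_pos hi]
        by_cases hm : PySem.List.slice lt (some (i : Int)) (some ((i + n : Nat) : Int)) = lterm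
        · rw [if_pos hm, if_pos hm, ih f2 (i + n) (by omega) (by omega)]
        · rw [if_neg hm, if_neg hm, ih f2 (i + 1) (by omega) (by omega)]
    · rw [hmScan_past t lt lterm n _ i (by omega), hmScan_past t lt lterm n f2 i (by omega)]

-- The match test of the scanner is "lterm is a prefix of lt from i".
lemma hmMatch_iff (lt lterm : List Char) (n i : Nat) (hlterm : lterm.length = n) :
    PySem.List.slice lt (some (i : Int)) (some ((i + n : Nat) : Int)) = lterm ↔
      lterm <+: lt.drop i := by
  rw [PySem.List.slice_natCast]
  have h : i + n - i = n := by omega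
  rw [h, List.prefix_iff_eq_take, hlterm, eq_comm]

-- Over a match-free stretch the scanner copies characters one by one.
lemma hmScan_walk (t lt lterm : List Char) (n : Nat) (hlterm : lterm.length = n) :
    ∀ k f i, i + k ≤ t.length → t.length ≤ i + f →
      (∀ j, i ≤ j → j < i + k → ¬ lterm <+: lt.drop j) →
      hmScan t lt lterm n f i = (t.drop i).take k ++ hmScan t lt lterm n (f - k) (i + k) := by
  intro k
  induction k with
  | zero => intro f i _ _ _; simp
  | succ k ih =>
    intro f i hk hf hno
    have hi : i < t.length := by omega
    cases f with
    | zero => omega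
    | succ f =>
      have hm : ¬ PySem.List.slice lt (some (i : Int)) (some ((i + n : Nat) : Int)) = lterm := by
        rw [hmMatch_iff lt lterm n i hlterm]
        exact hno i (le_refl i) (by omega)
      simp only [hmScan, if_pos hi, if_neg hm]
      rw [ih f (i + 1) (by omega) (by omega) (fun j hj1 hj2 => hno j (by omega) (by omega))]
      rw [List.drop_eq_getElem_cons hi, List.getD_eq_getElem t default hi]
      simp only [List.take_succ_cons, List.cons_append]
      have h1 : i + 1 + k = i + (k + 1) := by omega
      have h2 : f + 1 - (k + 1) = f - k := by omega
      rw [h1, h2]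

-- One step of the scanner at a matching position (fuel a variable, so it unfolds once).
lemma hmScan_step_match (t lt lterm : List Char) (n f s : Nat) (h1 : s < t.length)
    (h2 : PySem.List.slice lt (some (s : Int)) (some ((s + n : Nat) : Int)) = lterm) :
    hmScan t lt lterm n (f + 1) s
      = "[MATCH]".toList ++ PySem.List.slice t (some (s : Int)) (some ((s + n : Nat) : Int))
          ++ "[/MATCH]".toList ++ hmScan t lt lterm n f (s + n) := by
  simp only [hmScan, if_pos h1, if_pos h2]

-- A prefix somewhere at or after i is an infix of the suffix from i.
lemma hmInfix_of_prefix (lt lterm : List Char) (i j : Nat) (hij : i ≤ j)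
    (h : lterm <+: lt.drop j) : lterm <:+: lt.drop i := by
  have : lt.drop j = (lt.drop i).drop (j - i) := by
    rw [List.drop_drop]; congr 1; omega
  rw [this] at h
  exact h.isInfix.trans (List.drop_suffix _ _).isInfix

-- Main correspondence: A's find-loop from last_end = i equals the scan from i.
lemma hmLoopA_eq_scan (t lt lterm : List Char) (n : Nat) (hn : 1 ≤ n)
    (hlt : lt.length = t.length) (hlterm : lterm.length = n) :
    ∀ fuelA i acc, t.length - i < fuelA → i ≤ t.length →
      hmLoopA t lt lterm n fuelA i (PySem.Chars.findFrom lt lterm (i : Int) none) acc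
        = acc ++ hmScan t lt lterm n (t.length + 1) i := by
  intro fuelA
  induction fuelA with
  | zero => intro i acc h _; omega
  | succ fuelA ih =>
    intro i acc hfuel hi
    have hik : i ≤ lt.length := by omega
    by_cases hr : PySem.Chars.findFrom lt lterm (i : Int) none = -1
    · -- no further match: the scan just copies the tail
      have hno : ∀ j, i ≤ j → ¬ lterm <+: lt.drop j := by
        intro j hj hpre
        have hinf := hmInfix_of_prefix lt lterm i j hj hpre
        exact ((PySem.Chars.findFrom_natCast_eq_neg_one_iff lt lterm i hik).mp hr) hinf
      have hscan : hmScan t lt lterm n (t.length + 1) i = t.drop i := by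
        rw [hmScan_walk t lt lterm n hlterm (t.length - i) (t.length + 1) i (by omega)
              (by omega) (fun j hj1 hj2 => hno j hj1)]
        rw [hmScan_past t lt lterm n _ (i + (t.length - i)) (by omega)]
        have : (t.drop i).length = t.length - i := by simp
        rw [← this, List.take_length, List.append_nil]
      simp only [hmLoopA, if_pos hr, PySem.List.slice_from_natCast, hscan]
    · -- a match at s = (findFrom …).toNat
      obtain ⟨hge, hpre, hmin⟩ := PySem.Chars.findFrom_natCast_spec lt lterm i hik hr
      set s := (PySem.Chars.findFrom lt lterm (i : Int) none).toNat with hsdef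
      have hrs : PySem.Chars.findFrom lt lterm (i : Int) none = (s : Int) := by omega
      have his : i ≤ s := by omega
      have hlen_pre := hpre.length_le
      have hslt : s + n ≤ t.length := by
        simp [hlterm] at hlen_pre; omega
      -- unfold A's loop once
      simp only [hmLoopA, if_neg hr]
      rw [hrs]
      simp only [Int.toNat_natCast]
      have hcast : (s : Int) + (n : Int) = ((s + n : Nat) : Int) := by push_cast; ring
      rw [ih (s + n) _ (by omega) (by omega)]
      -- unfold the scan to the same shape
      rw [hmScan_walk t lt lterm n hlterm (s - i) (t.length + 1) i (by omega) (by omega)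
            (fun j hj1 hj2 => hmin j hj1 (by omega))]
      have hsi : i + (s - i) = s := by omega
      rw [hsi]
      rw [hmScan_fuel t lt lterm n hn (t.length + 1 - (s - i)) (t.length + 1) s
            (by omega) (by omega)]
      have hm : PySem.List.slice lt (some (s : Int)) (some ((s + n : Nat) : Int)) = lterm :=
        (hmMatch_iff lt lterm n s hlterm).mpr hpre
      rw [hmScan_step_match t lt lterm n t.length s (by omega) hm]
      rw [hmScan_fuel t lt lterm n hn t.length (t.length + 1) (s + n) (by omega) (by omega)]
      rw [PySem.List.slice_natCast, hcast]
      simp [List.append_assoc]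

-- ===== VERDICT =====
theorem highlight_match_py_spec : Claim_equal_highlight_match_py := by
  intro text search_term _ hpre
  unfold Spec_highlight_match_py highlight_match_py highlight_match_py_alt
  have hn : 1 ≤ search_term.toList.length := by
    have : search_term.toList ≠ [] := by
      intro h
      exact hpre (String.toList_eq_nil_iff.mp h)
    cases h : search_term.toList with
    | nil => exact absurd h this
    | cons a l => simp
  have hlt : (PySem.Chars.lower text.toList).length = text.toList.length := by
    simp [PySem.Chars.lower]
  have hlterm : (PySem.Chars.lower search_term.toList).length = search_term.toList.length := by
    simp [PySem.Chars.lower]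
  have h0 : PySem.Chars.find (PySem.Chars.lower text.toList)
        (PySem.Chars.lower search_term.toList)
      = PySem.Chars.findFrom (PySem.Chars.lower text.toList)
        (PySem.Chars.lower search_term.toList) ((0 : Nat) : Int) none := by
    simp [PySem.Chars.findFrom_zero]
  simp only [h0]
  rw [hmLoopA_eq_scan text.toList _ _ _ hn hlt hlterm (text.toList.length + 1) 0 []
        (by omega) (by omega)]
  simp
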